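-- pv_equiv track=rewrite | github.com/NoMoreActimel/agentic-rag-search | scripts/03c_generate_qa_by_era.py | classify_era
-- ===== SOURCE A (Python) =====
-- def classify_era(episode_ids: list[int], post_cutoff: set[int]) -> str:
--     eps = set(int(e) for e in episode_ids)
--     in_new = eps & post_cutoff
--     in_old = eps - post_cutoff
--     if in_new and not in_old:
--         return "new"
--     if in_old and not in_new:
--         return "old"
--     return "mixed"
-- ===== SOURCE B (Python) =====
-- def classify_era(episode_ids: list[int], post_cutoff: set[int]) -> str:
--     has_new = has_old = False
--     for e in episode_ids:
--         if int(e) in post_cutoff: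
--             has_new = True
--         else:
--             has_old = True
--         if has_new and has_old:
--             return "mixed"
--     if has_new:
--         return "new"
--     if has_old:
--         return "old"
--     return "mixed"
-- ===== Notes on version B (the rewrite author's own statement) =====
-- stated objective: faster
-- what changed: Replaces set construction and set algebra (intersection/difference, then truthiness tests) with a single short-circuiting linear pass maintaining two boolean flags, returning 'mixed' as soon as both old and new episodes are seen.
import Mathlib
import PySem

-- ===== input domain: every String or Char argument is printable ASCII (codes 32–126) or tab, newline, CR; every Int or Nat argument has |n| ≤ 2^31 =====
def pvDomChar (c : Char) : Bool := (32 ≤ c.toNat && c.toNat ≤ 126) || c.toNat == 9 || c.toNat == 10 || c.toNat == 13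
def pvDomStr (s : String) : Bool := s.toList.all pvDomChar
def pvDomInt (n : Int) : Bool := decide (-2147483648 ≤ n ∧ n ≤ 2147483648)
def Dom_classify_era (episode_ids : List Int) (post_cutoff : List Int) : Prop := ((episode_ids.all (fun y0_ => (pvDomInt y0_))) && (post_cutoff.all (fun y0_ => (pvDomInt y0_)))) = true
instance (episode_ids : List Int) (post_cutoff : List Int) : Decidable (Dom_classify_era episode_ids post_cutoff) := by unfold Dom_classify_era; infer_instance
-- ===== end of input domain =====

-- B replaces A's set-algebra (intersection/difference plus truthiness) with one short-circuiting
-- flag-tracking pass over the list; alternative decomposition, same asymptotic cost.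


-- ===== PORT A =====
def classify_era (episode_ids : List Int) (post_cutoff : List Int) : String :=
  let eps : PySem.Set Int := PySem.Set.ofList episode_ids
  let in_new := PySem.Set.inter eps post_cutoff
  let in_old := PySem.Set.diff eps post_cutoff
  if !in_new.isEmpty && in_old.isEmpty then "new"
  else if !in_old.isEmpty && in_new.isEmpty then "old"
  else "mixed"

-- ===== PORT B =====
-- the for-loop of Source B with its two flags and the early 'return "mixed"'
def classifyLoop (eids : List Int) (post_cutoff : List Int) (has_new has_old : Bool) : String :=
  match eids with
  | [] =>
      if has_new then "new"
      else if has_old then "old"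
      else "mixed"
  | e :: rest =>
      let has_new' := if post_cutoff.contains e then true else has_new
      let has_old' := if post_cutoff.contains e then has_old else true
      if has_new' && has_old' then "mixed"
      else classifyLoop rest post_cutoff has_new' has_old'

def classify_era_alt (episode_ids : List Int) (post_cutoff : List Int) : String :=
  classifyLoop episode_ids post_cutoff false false

-- ===== PRECONDITION & SPEC =====
def Spec_classify_era (episode_ids : List Int) (post_cutoff : List Int) (out : String) : Prop := out = classify_era_alt episode_ids post_cutoff
instance (episode_ids : List Int) (post_cutoff : List Int) (out : String) : Decidable (Spec_classify_era episode_ids post_cutoff out) := by unfold Spec_classify_era; infer_instance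

-- ===== CLAIM (what is proved, stated in full; the proofs are below) =====
def Claim_equal_classify_era : Prop := ∀ (episode_ids : List Int) (post_cutoff : List Int), Dom_classify_era episode_ids post_cutoff → Spec_classify_era episode_ids post_cutoff (classify_era episode_ids post_cutoff)

-- ===== LEMMAS AND PROOFS =====

-- abstract result from the two facts "some id is in post_cutoff" / "some id is not"
def eraOf (hasNew hasOld : Bool) : String :=
  if hasNew && !hasOld then "new" else if hasOld && !hasNew then "old" else "mixed"

theorem classifyLoop_eq (pc : List Int) (eids : List Int) (hn ho : Bool)
    (h : (hn && ho) = false) :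
    classifyLoop eids pc hn ho =
      eraOf (hn || eids.any (pc.contains ·)) (ho || eids.any (fun e => !pc.contains e)) := by
  induction eids generalizing hn ho with
  | nil => cases hn <;> cases ho <;> simp_all [classifyLoop, eraOf]
  | cons e rest ih =>
      simp only [classifyLoop, List.any_cons]
      cases hc : pc.contains e <;> cases hn <;> cases ho <;>
        simp_all [eraOf]

theorem classify_era_eq (eids pc : List Int) :
    classify_era eids pc =
      eraOf (eids.any (pc.contains ·)) (eids.any (fun e => !pc.contains e)) := by
  have hnew : (PySem.Set.inter (PySem.Set.ofList eids) pc).isEmpty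
      = !eids.any (pc.contains ·) := by
    rcases ha : eids.any (pc.contains ·) with _ | _
    · simp only [List.any_eq_false] at ha
      simp only [Bool.not_false, List.isEmpty_iff, List.eq_nil_iff_forall_not_mem]
      intro x hx
      rw [PySem.Set.mem_inter, PySem.Set.mem_ofList] at hx
      exact absurd (by simpa using hx.2) (by simpa using ha x hx.1)
    · simp only [List.any_eq_true] at ha
      obtain ⟨x, hx, hxp⟩ := ha
      have : x ∈ PySem.Set.inter (PySem.Set.ofList eids) pc := by
        rw [PySem.Set.mem_inter, PySem.Set.mem_ofList]
        exact ⟨hx, by simpa using hxp⟩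
      simp only [Bool.not_true]
      rw [List.isEmpty_eq_false_iff]
      exact List.ne_nil_of_mem this
  have hold : (PySem.Set.diff (PySem.Set.ofList eids) pc).isEmpty
      = !eids.any (fun e => !pc.contains e) := by
    rcases ha : eids.any (fun e => !pc.contains e) with _ | _
    · simp only [List.any_eq_false] at ha
      simp only [Bool.not_false, List.isEmpty_iff, List.eq_nil_iff_forall_not_mem]
      intro x hx
      rw [PySem.Set.mem_diff, PySem.Set.mem_ofList] at hx
      have := ha x hx.1
      simp at this
      exact hx.2 (by simpa using this)
    · simp only [List.any_eq_true] at ha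
      obtain ⟨x, hx, hxp⟩ := ha
      have : x ∈ PySem.Set.diff (PySem.Set.ofList eids) pc := by
        rw [PySem.Set.mem_diff, PySem.Set.mem_ofList]
        refine ⟨hx, ?_⟩
        simp at hxp
        simpa using hxp
      simp only [Bool.not_true]
      rw [List.isEmpty_eq_false_iff]
      exact List.ne_nil_of_mem this
  simp only [classify_era, eraOf, hnew, hold]
  cases eids.any (pc.contains ·) <;> cases eids.any (fun e => !pc.contains e) <;> simp

-- ===== VERDICT (by name: the statement is the Claim_ definition above) =====
theorem classify_era_spec : Claim_equal_classify_era := by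
  intro eids pc _
  unfold Spec_classify_era classify_era_alt
  rw [classify_era_eq, classifyLoop_eq _ _ _ _ rfl]
  simp
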